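-- pv_equiv track=rewrite | github.com/ContiHan/Statistika | src/visualization.py | _shorten_included_because
-- ===== SOURCE A (Python) =====
-- def _shorten_included_because(value):
--     text = str(value)
--     replacements = {
--         "Best overall validation RMSE": "Overall #1",
--         "Second-best overall validation RMSE": "Overall #2",
--         "Best statistical validation RMSE": "Stat #1",
--         "Best deep learning validation RMSE": "DL #1",
--         "Best foundation validation RMSE": "Foundation #1",
--         "Fastest tuning time": "Fastest",
--         "Manually selected": "Manual",
--     }
--     for old, new in replacements.items():
--         text = text.replace(old, new)
--     text = text.replace("; ", " + ")
--     return text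
-- ===== SOURCE B (Python) =====
-- def _shorten_included_because(value):
--     text = str(value)
--     rules = [
--         ("Best overall validation RMSE", "Overall #1"),
--         ("Second-best overall validation RMSE", "Overall #2"),
--         ("Best statistical validation RMSE", "Stat #1"),
--         ("Best deep learning validation RMSE", "DL #1"),
--         ("Best foundation validation RMSE", "Foundation #1"),
--         ("Fastest tuning time", "Fastest"),
--         ("Manually selected", "Manual"),
--         ("; ", " + "),
--     ]
--     out = []
--     i = 0
--     n = len(text)
--     while i < n:
--         for old, new in rules:
--             if text.startswith(old, i):
--                 out.append(new)
--                 i += len(old)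
--                 break
--         else:
--             out.append(text[i])
--             i += 1
--     return "".join(out)
-- ===== Notes on version B (the rewrite author's own statement) =====
-- stated objective: alternative
-- what changed: B replaces A's eight cascaded full-string str.replace passes by one simultaneous left-to-right scan over a rule table, matching each rule with startswith at the current index and emitting pieces joined at the end.
import Mathlib
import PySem

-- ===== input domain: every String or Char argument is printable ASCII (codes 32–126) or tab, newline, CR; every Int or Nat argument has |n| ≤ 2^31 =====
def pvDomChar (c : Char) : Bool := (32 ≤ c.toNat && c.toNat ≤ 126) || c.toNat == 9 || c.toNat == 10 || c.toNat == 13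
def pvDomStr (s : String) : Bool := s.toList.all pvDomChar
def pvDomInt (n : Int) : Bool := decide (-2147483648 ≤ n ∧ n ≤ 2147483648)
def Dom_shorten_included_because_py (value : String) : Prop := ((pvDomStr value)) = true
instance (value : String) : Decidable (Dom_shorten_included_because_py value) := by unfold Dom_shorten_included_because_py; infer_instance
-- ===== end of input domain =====

-- B replaces A's eight cascaded full-string str.replace passes by one simultaneous
-- left-to-right scan over a rule table (alternative decomposition, same exact output).

-- ===== PORT A =====
def shorten_included_because_py (value : String) : String :=
  let text := value  -- str(value) on a str is the identity
  let text := PySem.Str.replace text "Best overall validation RMSE" "Overall #1"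
  let text := PySem.Str.replace text "Second-best overall validation RMSE" "Overall #2"
  let text := PySem.Str.replace text "Best statistical validation RMSE" "Stat #1"
  let text := PySem.Str.replace text "Best deep learning validation RMSE" "DL #1"
  let text := PySem.Str.replace text "Best foundation validation RMSE" "Foundation #1"
  let text := PySem.Str.replace text "Fastest tuning time" "Fastest"
  let text := PySem.Str.replace text "Manually selected" "Manual"
  let text := PySem.Str.replace text "; " " + "
  text

-- ===== PORT B =====
-- the rule table of Source B, in the same order
def pvRules : List (List Char × List Char) :=
  [ ("Best overall validation RMSE".toList, "Overall #1".toList),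
    ("Second-best overall validation RMSE".toList, "Overall #2".toList),
    ("Best statistical validation RMSE".toList, "Stat #1".toList),
    ("Best deep learning validation RMSE".toList, "DL #1".toList),
    ("Best foundation validation RMSE".toList, "Foundation #1".toList),
    ("Fastest tuning time".toList, "Fastest".toList),
    ("Manually selected".toList, "Manual".toList),
    ("; ".toList, " + ".toList) ]

-- the inner `for old, new in rules: if text.startswith(old, i)` loop of Source B
def pvFirstMatch (rules : List (List Char × List Char)) (s : List Char) :
    Option (List Char × List Char) :=
  rules.find? (fun q => q.1.isPrefixOf s)

-- the outer `while i < n` loop of Source B: one left-to-right pass emitting pieces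
def pvScan (rules : List (List Char × List Char)) : List Char → List Char
  | [] => []
  | c :: t =>
    match pvFirstMatch rules (c :: t) with
    | some (k, r) => r ++ pvScan rules (List.drop (k.length - 1) t)
    | none => c :: pvScan rules t
  termination_by s => s.length
  decreasing_by all_goals simp [List.length_drop]

def shorten_included_because_py_alt (value : String) : String :=
  String.ofList (pvScan pvRules value.toList)   -- ''.join(out) over the emitted pieces

-- ===== PRECONDITION & SPEC =====
def Spec_shorten_included_because_py (value : String) (out : String) : Prop := out = shorten_included_because_py_alt value
instance (value : String) (out : String) : Decidable (Spec_shorten_included_because_py value out) := by unfold Spec_shorten_included_because_py; infer_instance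

-- ===== CLAIM (what is proved, stated in full; the proofs are below) =====
def Claim_equal_shorten_included_because_py : Prop := ∀ (value : String), Dom_shorten_included_because_py value → Spec_shorten_included_because_py value (shorten_included_because_py value)

-- ===== LEMMAS AND PROOFS =====

-- clean recursive form of CPython's str.replace (old nonempty): leftmost,
-- non-overlapping, single pass with one key
def pvRep (old new : List Char) : List Char → List Char
  | [] => []
  | c :: t =>
    if old.isPrefixOf (c :: t) then new ++ pvRep old new (List.drop (old.length - 1) t)
    else c :: pvRep old new t
  termination_by s => s.length
  decreasing_by all_goals simp [List.length_drop]

lemma pvGo_eq (old new : List Char) (hold : old ≠ []) :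
    ∀ (fuel : Nat) (l acc : List Char), l.length ≤ fuel →
      PySem.Chars.replace.go old new fuel l acc = acc.reverse ++ pvRep old new l := by
  intro fuel
  induction fuel with
  | zero =>
    intro l acc h
    have hl : l = [] := by cases l <;> simp_all
    subst hl
    rw [PySem.Chars.replace.go]
    simp [pvRep]
  | succ fuel ih =>
    intro l acc h
    cases l with
    | nil =>
      rw [PySem.Chars.replace.go]
      simp [pvRep]
      omega
    | cons c t =>
      rw [PySem.Chars.replace.go]
      by_cases hp : old.isPrefixOf (c :: t) = true
      · rw [if_pos hp]
        have hlen : (List.drop old.length (c :: t)).length ≤ fuel := by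
          have : 1 ≤ old.length := by cases old <;> simp_all
          simp only [List.length_drop, List.length_cons]
          simp at h
          omega
        rw [ih _ _ hlen]
        cases old with
        | nil => exact absurd rfl hold
        | cons o0 o' =>
          rw [pvRep, if_pos hp]
          simp [List.drop_succ_cons]
      · rw [if_neg hp]
        have hlen : t.length ≤ fuel := by simp at h; omega
        rw [ih _ _ hlen, pvRep, if_neg hp]
        simp

lemma pvReplace_eq (s old new : List Char) (hold : old ≠ []) :
    PySem.Chars.replace s old new = pvRep old new s := by
  unfold PySem.Chars.replace
  rw [if_neg (by simp [List.isEmpty_iff]; exact hold)]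
  simpa using pvGo_eq old new hold s.length s [] le_rfl

-- "a cannot interact with key k": k occurs nowhere in a, and no suffix of a
-- is a prefix of k — so no occurrence of k can start inside a
def pvCrossFree (a k : List Char) : Bool :=
  (!PySem.Chars.isIn k a) && (List.range a.length).all (fun p => !((a.drop p).isPrefixOf k))

lemma pvCrossFree_spec (a k : List Char) (h : pvCrossFree a k = true) :
    ∀ (u : List Char) (p : Nat), p < a.length → ¬ k <+: (a.drop p ++ u) := by
  simp only [pvCrossFree, Bool.and_eq_true, Bool.not_eq_true', List.all_eq_true] at h
  obtain ⟨hin, hall⟩ := h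
  intro u p hp hpre
  rcases List.prefix_or_prefix_of_prefix hpre (List.prefix_append _ u) with h1 | h2
  · have : k <:+: a := h1.isInfix.trans (List.drop_suffix p a).isInfix
    exact ((PySem.Chars.isIn_eq_false_iff k a).mp hin) this
  · have hfalse := hall p (List.mem_range.mpr hp)
    rw [Bool.eq_false_iff] at hfalse
    exact hfalse (List.isPrefixOf_iff_prefix.mpr h2)

lemma pvScan_cons_some (rules : List (List Char × List Char)) (c : Char) (t k r : List Char)
    (h : pvFirstMatch rules (c :: t) = some (k, r)) :
    pvScan rules (c :: t) = r ++ pvScan rules (List.drop (k.length - 1) t) := by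
  rw [pvScan, h]

lemma pvScan_cons_none (rules : List (List Char × List Char)) (c : Char) (t : List Char)
    (h : pvFirstMatch rules (c :: t) = none) :
    pvScan rules (c :: t) = c :: pvScan rules t := by
  rw [pvScan, h]

lemma pvRep_shift (old new a u : List Char)
    (h : ∀ p, p < a.length → ¬ old <+: (a.drop p ++ u)) :
    pvRep old new (a ++ u) = a ++ pvRep old new u := by
  induction a with
  | nil => simp
  | cons c a' ih =>
    have hnp : old.isPrefixOf (c :: (a' ++ u)) = false := by
      rw [Bool.eq_false_iff]
      intro hc
      exact h 0 (by simp) (by simpa using (List.isPrefixOf_iff_prefix.mp hc))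
    show pvRep old new (c :: (a' ++ u)) = _
    rw [pvRep, if_neg (by simp [hnp])]
    rw [ih (fun p hp => by simpa using h (p + 1) (by simpa using hp))]
    simp

lemma pvScan_shift (rules : List (List Char × List Char)) (a u : List Char)
    (h : ∀ q ∈ rules, ∀ p, p < a.length → ¬ q.1 <+: (a.drop p ++ u)) :
    pvScan rules (a ++ u) = a ++ pvScan rules u := by
  induction a with
  | nil => simp
  | cons c a' ih =>
    have hfm : pvFirstMatch rules (c :: (a' ++ u)) = none := by
      apply List.find?_eq_none.mpr
      intro q hq
      rw [Bool.not_eq_true, Bool.eq_false_iff]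
      intro hc
      exact h q hq 0 (by simp) (by simpa using (List.isPrefixOf_iff_prefix.mp hc))
    show pvScan rules (c :: (a' ++ u)) = _
    rw [pvScan_cons_none _ _ _ hfm]
    rw [ih (fun q hq p hp => by simpa using h q hq (p + 1) (by simpa using hp))]
    simp

lemma pvRep_append_self (old new v : List Char) (hold : old ≠ []) :
    pvRep old new (old ++ v) = new ++ pvRep old new v := by
  cases old with
  | nil => exact absurd rfl hold
  | cons o0 o' =>
    show pvRep (o0 :: o') new (o0 :: (o' ++ v)) = _
    rw [pvRep, if_pos (List.isPrefixOf_iff_prefix.mpr (by exact ⟨v, by simp⟩))]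
    simp


-- if a (nonempty) suffix of key kj is a prefix of the scan output, it was
-- already a prefix of the input: outputs cannot fabricate a kj-occurrence
lemma pvScanD (P : List (List Char × List Char)) (kj : List Char)
    (hD : ∀ q ∈ P, ∀ m ∈ List.range kj.length, 0 < m →
          ¬ (kj.drop m <+: q.2) ∧ ¬ (q.2 <+: kj.drop m)) :
    ∀ (n : Nat) (t : List Char), t.length ≤ n → ∀ m, 0 < m →
      kj.drop m <+: pvScan P t → kj.drop m <+: t := by
  intro n
  induction n with
  | zero =>
    intro t ht m hm hpre
    have : t = [] := by cases t <;> simp_all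
    subst this
    simpa [pvScan] using hpre
  | succ n ih =>
    intro t ht m hm hpre
    cases t with
    | nil => simpa [pvScan] using hpre
    | cons c t' =>
      by_cases hnil : kj.drop m = []
      · simp [hnil]
      have hmlt : m < kj.length := by
        rcases Nat.lt_or_ge m kj.length with h | h
        · exact h
        · exact absurd (List.drop_eq_nil_of_le h) hnil
      cases hfm : pvFirstMatch P (c :: t') with
      | some q =>
        obtain ⟨k, r⟩ := q
        have hmem : (k, r) ∈ P := List.mem_of_find?_eq_some hfm
        rw [pvScan_cons_some _ _ _ _ _ hfm] at hpre
        rcases List.prefix_or_prefix_of_prefix hpre (List.prefix_append r _) with h1 | h2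
        · exact absurd h1 ((hD _ hmem m (List.mem_range.mpr hmlt) hm).1)
        · exact absurd h2 ((hD _ hmem m (List.mem_range.mpr hmlt) hm).2)
      | none =>
        rw [pvScan_cons_none _ _ _ hfm] at hpre
        cases hd : kj.drop m with
        | nil => exact absurd hd hnil
        | cons e rest =>
          rw [hd, List.cons_prefix_cons] at hpre
          obtain ⟨hec, hrest⟩ := hpre
          have hdrop1 : kj.drop (m + 1) = rest := by
            have h11 : kj.drop (m + 1) = (kj.drop m).drop 1 := by
              rw [List.drop_drop]
            rw [h11, hd]
            simp
          have hih := ih t' (by simp at ht; omega) (m + 1) (by omega)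
            (by rw [hdrop1]; exact hrest)
          exact List.cons_prefix_cons.mpr ⟨hec, by rw [← hdrop1]; exact hih⟩

-- one cascade pass after a simultaneous scan = the scan with the key added
lemma pvPass (P : List (List Char × List Char)) (kj rj : List Char)
    (hkj : kj ≠ [])
    (hA : ∀ q ∈ P, pvCrossFree q.2 kj = true)
    (hB : ∀ q ∈ P, pvCrossFree kj q.1 = true)
    (hD : ∀ q ∈ P, ∀ m ∈ List.range kj.length, 0 < m →
          ¬ (kj.drop m <+: q.2) ∧ ¬ (q.2 <+: kj.drop m)) :
    ∀ (n : Nat) (s : List Char), s.length ≤ n →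
      pvRep kj rj (pvScan P s) = pvScan (P ++ [(kj, rj)]) s := by
  intro n
  induction n with
  | zero =>
    intro s hs
    have : s = [] := by cases s <;> simp_all
    subst this
    simp [pvScan, pvRep]
  | succ n ih =>
    intro s hs
    cases s with
    | nil => simp [pvScan, pvRep]
    | cons c t =>
      cases hfm : pvFirstMatch P (c :: t) with
      | some q =>
        obtain ⟨k, r⟩ := q
        have hmem : (k, r) ∈ P := List.mem_of_find?_eq_some hfm
        have hfm2 : pvFirstMatch (P ++ [(kj, rj)]) (c :: t) = some (k, r) := by
          unfold pvFirstMatch at hfm ⊢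
          rw [List.find?_append, hfm]
          rfl
        rw [pvScan_cons_some _ _ _ _ _ hfm, pvScan_cons_some _ _ _ _ _ hfm2]
        rw [pvRep_shift _ _ _ _ (fun p hp => pvCrossFree_spec r kj (hA _ hmem) _ p hp)]
        rw [ih _ (by simp at hs ⊢; omega)]
      | none =>
        have hnoneP : ∀ q ∈ P, ¬ (q.1.isPrefixOf (c :: t) = true) := by
          intro q hq
          have := List.find?_eq_none.mp hfm q hq
          simpa using this
        by_cases hj : kj <+: (c :: t)
        · -- the new key matches here
          obtain ⟨v, hv⟩ := hj
          cases kj with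
          | nil => exact absurd rfl hkj
          | cons k0 kj' =>
            have hk0 : k0 = c := by
              have := hv
              simp [List.cons_append] at this
              exact this.1
            have hkt : kj' ++ v = t := by
              have := hv
              simp [List.cons_append] at this
              exact this.2
            have hscanP : pvScan P (c :: t) = (k0 :: kj') ++ pvScan P v := by
              rw [← hv]
              exact pvScan_shift P (k0 :: kj') v
                (fun q hq p hp => pvCrossFree_spec (k0 :: kj') q.1 (hB _ hq) _ p hp)
            have hfm2 : pvFirstMatch (P ++ [(k0 :: kj', rj)]) (c :: t) = some (k0 :: kj', rj) := by
              unfold pvFirstMatch at hfm ⊢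
              rw [List.find?_append, hfm]
              simp [List.isPrefixOf_iff_prefix]
              exact ⟨hk0, v, hkt⟩
            rw [hscanP, pvRep_append_self _ _ _ hkj]
            rw [pvScan_cons_some _ _ _ _ _ hfm2]
            have hdv : List.drop ((k0 :: kj').length - 1) t = v := by
              rw [← hkt]
              simp
            rw [hdv]
            have hvlen : v.length ≤ n := by
              have hlv : (k0 :: kj').length + v.length = (c :: t).length := by
                rw [← hv]; simp; omega
              simp at hlv hs
              omega
            rw [ih _ hvlen]
        · -- no key at all matches here
          have hfm2 : pvFirstMatch (P ++ [(kj, rj)]) (c :: t) = none := by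
            unfold pvFirstMatch at hfm ⊢
            rw [List.find?_append, hfm]
            simp [List.isPrefixOf_iff_prefix]
            exact hj
          rw [pvScan_cons_none _ _ _ hfm, pvScan_cons_none _ _ _ hfm2]
          have hnp : kj.isPrefixOf (c :: pvScan P t) = false := by
            rw [Bool.eq_false_iff]
            intro hc
            rw [List.isPrefixOf_iff_prefix] at hc
            cases kj with
            | nil => exact absurd rfl hkj
            | cons k0 kj' =>
              rw [List.cons_prefix_cons] at hc
              obtain ⟨hk0, hkj'⟩ := hc
              have h1 : (k0 :: kj').drop 1 <+: pvScan P t := by simpa using hkj'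
              have h2 : (k0 :: kj').drop 1 <+: t :=
                pvScanD P (k0 :: kj') hD t.length t le_rfl 1 (by omega) h1
              exact hj (by
                subst hk0
                exact List.cons_prefix_cons.mpr ⟨rfl, by simpa using h2⟩)
          rw [pvRep, if_neg (by simp [hnp])]
          rw [ih _ (by simp at hs; omega)]

lemma pvScan_nil (s : List Char) : pvScan [] s = s := by
  induction s with
  | nil => simp [pvScan]
  | cons c t ih =>
    rw [pvScan_cons_none _ _ _ rfl, ih]

-- the full cascade over the rule table equals the one-pass scan
lemma pvChain_eq_scan (s : List Char) :
    pvRep "; ".toList " + ".toList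
      (pvRep "Manually selected".toList "Manual".toList
        (pvRep "Fastest tuning time".toList "Fastest".toList
          (pvRep "Best foundation validation RMSE".toList "Foundation #1".toList
            (pvRep "Best deep learning validation RMSE".toList "DL #1".toList
              (pvRep "Best statistical validation RMSE".toList "Stat #1".toList
                (pvRep "Second-best overall validation RMSE".toList "Overall #2".toList
                  (pvRep "Best overall validation RMSE".toList "Overall #1".toList s)))))))
      = pvScan pvRules s := by
  have h1 := pvPass [] "Best overall validation RMSE".toList "Overall #1".toList
    (by decide) (by decide) (by decide) (by decide)
  have h2 := pvPass [("Best overall validation RMSE".toList, "Overall #1".toList)]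
    "Second-best overall validation RMSE".toList "Overall #2".toList
    (by decide) (by decide) (by decide) (by decide)
  have h3 := pvPass [("Best overall validation RMSE".toList, "Overall #1".toList),
    ("Second-best overall validation RMSE".toList, "Overall #2".toList)]
    "Best statistical validation RMSE".toList "Stat #1".toList
    (by decide) (by decide) (by decide) (by decide)
  have h4 := pvPass [("Best overall validation RMSE".toList, "Overall #1".toList),
    ("Second-best overall validation RMSE".toList, "Overall #2".toList),
    ("Best statistical validation RMSE".toList, "Stat #1".toList)]
    "Best deep learning validation RMSE".toList "DL #1".toList
    (by decide) (by decide) (by decide) (by decide)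
  have h5 := pvPass [("Best overall validation RMSE".toList, "Overall #1".toList),
    ("Second-best overall validation RMSE".toList, "Overall #2".toList),
    ("Best statistical validation RMSE".toList, "Stat #1".toList),
    ("Best deep learning validation RMSE".toList, "DL #1".toList)]
    "Best foundation validation RMSE".toList "Foundation #1".toList
    (by decide) (by decide) (by decide) (by decide)
  have h6 := pvPass [("Best overall validation RMSE".toList, "Overall #1".toList),
    ("Second-best overall validation RMSE".toList, "Overall #2".toList),
    ("Best statistical validation RMSE".toList, "Stat #1".toList),
    ("Best deep learning validation RMSE".toList, "DL #1".toList),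
    ("Best foundation validation RMSE".toList, "Foundation #1".toList)]
    "Fastest tuning time".toList "Fastest".toList
    (by decide) (by decide) (by decide) (by decide)
  have h7 := pvPass [("Best overall validation RMSE".toList, "Overall #1".toList),
    ("Second-best overall validation RMSE".toList, "Overall #2".toList),
    ("Best statistical validation RMSE".toList, "Stat #1".toList),
    ("Best deep learning validation RMSE".toList, "DL #1".toList),
    ("Best foundation validation RMSE".toList, "Foundation #1".toList),
    ("Fastest tuning time".toList, "Fastest".toList)]
    "Manually selected".toList "Manual".toList
    (by decide) (by decide) (by decide) (by decide)
  have h8 := pvPass [("Best overall validation RMSE".toList, "Overall #1".toList),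
    ("Second-best overall validation RMSE".toList, "Overall #2".toList),
    ("Best statistical validation RMSE".toList, "Stat #1".toList),
    ("Best deep learning validation RMSE".toList, "DL #1".toList),
    ("Best foundation validation RMSE".toList, "Foundation #1".toList),
    ("Fastest tuning time".toList, "Fastest".toList),
    ("Manually selected".toList, "Manual".toList)]
    "; ".toList " + ".toList
    (by decide) (by decide) (by decide) (by decide)
  simp only [List.cons_append, List.nil_append] at h1 h2 h3 h4 h5 h6 h7 h8
  have e1 : pvRep "Best overall validation RMSE".toList "Overall #1".toList s
      = pvScan [("Best overall validation RMSE".toList, "Overall #1".toList)] s := by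
    have := h1 s.length s le_rfl
    rwa [pvScan_nil] at this
  rw [e1]
  rw [h2 _ _ le_rfl, h3 _ _ le_rfl, h4 _ _ le_rfl, h5 _ _ le_rfl, h6 _ _ le_rfl,
    h7 _ _ le_rfl, h8 _ _ le_rfl]
  rfl

-- ===== VERDICT (by name: the statement is the Claim_ definition above) =====
theorem shorten_included_because_py_spec : Claim_equal_shorten_included_because_py := by
  intro value _
  unfold Spec_shorten_included_because_py shorten_included_because_py
    shorten_included_because_py_alt
  have htl : ∀ (s : String) (o n : String), o.toList ≠ [] →
      (PySem.Str.replace s o n).toList = pvRep o.toList n.toList s.toList := by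
    intro s o n ho
    rw [PySem.Str.toList_replace, pvReplace_eq _ _ _ ho]
  apply String.toList_inj.mp
  rw [htl _ _ _ (by decide), htl _ _ _ (by decide), htl _ _ _ (by decide),
    htl _ _ _ (by decide), htl _ _ _ (by decide), htl _ _ _ (by decide),
    htl _ _ _ (by decide), htl _ _ _ (by decide)]
  rw [pvChain_eq_scan]
  rw [String.toList_ofList]
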